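-- pv_equiv track=rewrite | github.com/Wizmann/ACM-ICPC | LintCode/python/Subset With Target.py | subsetWithTarget
-- ===== SOURCE A (Python) =====
-- def subsetWithTarget(nums, target):
--     nums.sort()
--     n = len(nums)
--     res = 0
--     p, q = 0, n - 1
--     while p <= q:
--         if nums[p] + nums[q] >= target:
--             q -= 1
--         else:
--             res += 1 << max(0, (q - p))
--             p += 1
--     return res
-- ===== SOURCE B (Python) =====
-- def subsetWithTarget(nums, target):
--     s = sorted(nums)
--     n = len(s)
--     res = 0
--     for i in range(n):
--         val = target - s[i]
--         # first index k in [i, n) with s[k] >= val (bisect_left restricted to [i, n))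
--         lo, hi = i, n
--         while lo < hi:
--             mid = (lo + hi) // 2
--             if s[mid] < val:
--                 lo = mid + 1
--             else:
--                 hi = mid
--         if lo - 1 >= i:
--             res += 1 << (lo - 1 - i)
--     return res
-- ===== Notes on version B (the rewrite author's own statement) =====
-- stated objective: alternative
-- what changed: Replaces the inward two-pointer sweep with sort + an independent binary search per element: for each i the largest j >= i with s[i]+s[j] < target is found by binary search and contributes 1 << (j-i); B also does not mutate the input list.
import Mathlib
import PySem

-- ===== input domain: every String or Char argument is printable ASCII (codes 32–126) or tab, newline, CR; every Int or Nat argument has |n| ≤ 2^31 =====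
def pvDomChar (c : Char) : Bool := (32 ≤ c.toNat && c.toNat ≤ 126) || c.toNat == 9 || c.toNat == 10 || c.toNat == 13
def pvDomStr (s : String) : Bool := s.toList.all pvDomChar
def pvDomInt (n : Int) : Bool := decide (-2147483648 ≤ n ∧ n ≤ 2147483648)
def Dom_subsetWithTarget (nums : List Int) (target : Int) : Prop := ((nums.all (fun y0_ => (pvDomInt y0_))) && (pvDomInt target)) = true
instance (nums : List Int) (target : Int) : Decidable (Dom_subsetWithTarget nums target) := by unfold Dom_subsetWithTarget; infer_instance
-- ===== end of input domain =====

-- B replaces A's inward two-pointer sweep by sort + one binary search per element (alternative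
-- algorithm, same O(n log n)); equivalence is about the RETURN value only: A sorts nums in place, B does not mutate it.

-- ===== PORT A =====
-- A's while loop: state (p, q, res); fuel (q+1-p).toNat only makes the loop total (it exceeds the
-- iteration count, and each exit branch returns res); '1 << k' (k ≥ 0 here by max) is ported as 2 ^ k.toNat (exact for k ≥ 0).
def loopA (s : List Int) (target : Int) : Nat → Int → Int → Int → Int
  | 0, _, _, res => res
  | fuel + 1, p, q, res =>
    if p ≤ q then
      if PySem.List.pyGetD s p 0 + PySem.List.pyGetD s q 0 ≥ target then
        loopA s target fuel p (q - 1) res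
      else
        loopA s target fuel (p + 1) q (res + 2 ^ (max 0 (q - p)).toNat)
    else res

def subsetWithTarget (nums : List Int) (target : Int) : Int :=
  let s := PySem.List.sorted nums (fun x => x) false
  loopA s target s.length 0 ((s.length : Int) - 1) 0

-- ===== PORT B =====
-- B's inner while loop: first index k in [lo, hi) with s[k] >= val (hand-written bisect_left);
-- fuel (hi-lo).toNat only makes the loop total (it bounds the iteration count, and both exits return lo).
def bsearchB (s : List Int) (val : Int) : Nat → Int → Int → Int
  | 0, lo, _ => lo
  | fuel + 1, lo, hi =>
    if lo < hi then
      let mid := PySem.Int.floordiv (lo + hi) 2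
      if PySem.List.pyGetD s mid 0 < val then bsearchB s val fuel (mid + 1) hi
      else bsearchB s val fuel lo mid
    else lo

def subsetWithTarget_alt (nums : List Int) (target : Int) : Int :=
  let s := PySem.List.sorted nums (fun x => x) false
  let n : Int := (s.length : Int)
  (PySem.List.pyRange 0 n).foldl (fun res i =>
      let val := target - PySem.List.pyGetD s i 0
      let lo := bsearchB s val (n - i).toNat i n
      if lo - 1 ≥ i then res + 2 ^ (lo - 1 - i).toNat else res) 0

-- ===== PRECONDITION & SPEC =====
def Spec_subsetWithTarget (nums : List Int) (target : Int) (out : Int) : Prop := out = subsetWithTarget_alt nums target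
instance (nums : List Int) (target : Int) (out : Int) : Decidable (Spec_subsetWithTarget nums target out) := by unfold Spec_subsetWithTarget; infer_instance

-- ===== CLAIM (what is proved, stated in full; the proofs are below) =====
def Claim_equal_subsetWithTarget : Prop := ∀ (nums : List Int) (target : Int), Dom_subsetWithTarget nums target → Spec_subsetWithTarget nums target (subsetWithTarget nums target)

-- ===== LEMMAS AND PROOFS =====

-- '//' by the literal 2 is Python floor division.
theorem floordiv_two_eq (a : Int) : PySem.Int.floordiv a 2 = a / 2 := by
  simp [PySem.Int.floordiv, Int.fdiv_eq_ediv]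

-- B's fold body, named for the proofs (definitionally the lambda inside subsetWithTarget_alt).
def BB (s : List Int) (target : Int) (res i : Int) : Int :=
  if bsearchB s (target - PySem.List.pyGetD s i 0) (((s.length : Int) - i).toNat) i (s.length : Int) - 1 ≥ i then
    res + 2 ^ (bsearchB s (target - PySem.List.pyGetD s i 0) (((s.length : Int) - i).toNat) i (s.length : Int) - 1 - i).toNat
  else res

theorem alt_eq_foldl (nums : List Int) (target : Int) :
    subsetWithTarget_alt nums target =
      (PySem.List.pyRange 0 ((PySem.List.sorted nums (fun x => x) false).length : Int)).foldl
        (BB (PySem.List.sorted nums (fun x => x) false) target) 0 := rfl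

theorem getD_mono (s : List Int) (hs : s.Pairwise (· ≤ ·)) {i j : Int}
    (h0 : 0 ≤ i) (hij : i ≤ j) (hj : j < (s.length : Int)) :
    PySem.List.pyGetD s i 0 ≤ PySem.List.pyGetD s j 0 := by
  rw [PySem.List.pyGetD_eq_getElem s 0 h0 (by omega), PySem.List.pyGetD_eq_getElem s 0 (by omega) hj]
  rcases eq_or_lt_of_le hij with h | h
  · simp [h]
  · exact (List.pairwise_iff_getElem.mp hs) i.toNat j.toNat (by omega) (by omega) (by omega)

theorem bsearchB_spec (s : List Int) (val : Int) :
    ∀ (k : Nat) (lo hi c : Int), (hi - lo).toNat ≤ k → 0 ≤ lo → lo ≤ c → c ≤ hi →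
    (∀ m : Int, lo ≤ m → m < c → PySem.List.pyGetD s m 0 < val) →
    (∀ m : Int, c ≤ m → m < hi → val ≤ PySem.List.pyGetD s m 0) →
    bsearchB s val k lo hi = c := by
  intro k
  induction k with
  | zero =>
    intro lo hi c hk h0 h1 h2 _ _
    simp only [bsearchB]
    omega
  | succ k ih =>
    intro lo hi c hk h0 h1 h2 hlt hge
    simp only [bsearchB]
    by_cases hlh : lo < hi
    · rw [if_pos hlh]
      have hmid1 : lo ≤ PySem.Int.floordiv (lo + hi) 2 := by
        simp only [floordiv_two_eq]; omega
      have hmid2 : PySem.Int.floordiv (lo + hi) 2 < hi := by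
        simp only [floordiv_two_eq]; omega
      by_cases hv : PySem.List.pyGetD s (PySem.Int.floordiv (lo + hi) 2) 0 < val
      · rw [if_pos hv]
        have hmc : PySem.Int.floordiv (lo + hi) 2 < c := by
          by_contra hcon
          exact absurd (hge _ (by omega) hmid2) (by omega)
        exact ih _ hi c (by omega) (by omega) (by omega) h2
          (fun m hm1 hm2 => hlt m (by omega) hm2) hge
      · rw [if_neg hv]
        have hcm : c ≤ PySem.Int.floordiv (lo + hi) 2 := by
          by_contra hcon
          exact absurd (hlt _ hmid1 (by omega)) (by omega)
        exact ih lo _ c (by omega) h0 h1 (by omega) hlt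
          (fun m hm1 hm2 => hge m hm1 (by omega))
    · rw [if_neg hlh]
      omega

theorem tail_zero (s : List Int) (target : Int) :
    ∀ (k : Nat) (a res : Int), ((s.length : Int) - a).toNat ≤ k → 0 ≤ a →
    (∀ i j : Int, a ≤ i → i ≤ j → j < (s.length : Int) → target ≤ PySem.List.pyGetD s i 0 + PySem.List.pyGetD s j 0) →
    (PySem.List.pyRange a (s.length : Int)).foldl (BB s target) res = res := by
  intro k
  induction k with
  | zero =>
    intro a res hk h0 _
    rw [PySem.List.pyRange_one_eq_nil (by omega)]
    rfl
  | succ k ih =>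
    intro a res hk h0 hinv
    by_cases ha : a < (s.length : Int)
    · rw [PySem.List.pyRange_one_cons ha, List.foldl_cons]
      have hb : bsearchB s (target - PySem.List.pyGetD s a 0) (((s.length : Int) - a).toNat) a (s.length : Int) = a := by
        apply bsearchB_spec s _ (((s.length : Int) - a).toNat) a (s.length : Int) a
          (le_refl _) h0 (by omega) (by omega) (fun m hm1 hm2 => absurd hm1 (by omega))
        intro m hm1 hm2
        have := hinv a m (le_refl a) hm1 hm2
        omega
      have hbb : BB s target res a = res := by
        unfold BB
        rw [hb, if_neg (by omega)]
      rw [hbb]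
      exact ih (a + 1) res (by omega) (by omega)
        (fun i j hi hj hjn => hinv i j (by omega) hj hjn)
    · rw [PySem.List.pyRange_one_eq_nil (by omega)]
      rfl

theorem loopA_eq (s : List Int) (target : Int) (hs : s.Pairwise (· ≤ ·)) :
    ∀ (k : Nat) (p q res : Int), (q + 1 - p).toNat ≤ k → 0 ≤ p → p ≤ q + 1 → q ≤ (s.length : Int) - 1 →
    (∀ i j : Int, p ≤ i → i ≤ j → q < j → j < (s.length : Int) → target ≤ PySem.List.pyGetD s i 0 + PySem.List.pyGetD s j 0) →
    loopA s target k p q res = (PySem.List.pyRange p (s.length : Int)).foldl (BB s target) res := by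
  intro k
  induction k with
  | zero =>
    intro p q res hk h0 h1 h2 hinv
    simp only [loopA]
    exact (tail_zero s target ((s.length : Int) - p).toNat p res (le_refl _) h0
      (fun i j hi hj hjn => hinv i j hi hj (by omega) hjn)).symm
  | succ k ih =>
    intro p q res hk h0 h1 h2 hinv
    simp only [loopA]
    by_cases hpq : p ≤ q
    · rw [if_pos hpq]
      by_cases hge : PySem.List.pyGetD s p 0 + PySem.List.pyGetD s q 0 ≥ target
      · rw [if_pos hge]
        apply ih p (q - 1) res (by omega) h0 (by omega) (by omega)
        intro i j hi hj hq hjn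
        rcases eq_or_lt_of_le (show q ≤ j by omega) with h | h
        · subst h
          have : PySem.List.pyGetD s p 0 ≤ PySem.List.pyGetD s i 0 :=
            getD_mono s hs h0 hi (by omega)
          omega
        · exact hinv i j hi hj h hjn
      · rw [if_neg hge]
        have hpn : p < (s.length : Int) := by omega
        have hb : bsearchB s (target - PySem.List.pyGetD s p 0) (((s.length : Int) - p).toNat) p (s.length : Int) = q + 1 := by
          apply bsearchB_spec s _ (((s.length : Int) - p).toNat) p (s.length : Int) (q + 1)
            (le_refl _) h0 (by omega) (by omega)
          · intro m hm1 hm2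
            have : PySem.List.pyGetD s m 0 ≤ PySem.List.pyGetD s q 0 :=
              getD_mono s hs (by omega) (by omega) (by omega)
            omega
          · intro m hm1 hm2
            have := hinv p m (le_refl p) (by omega) (by omega) hm2
            omega
        have hbb : BB s target res p = res + 2 ^ (q - p).toNat := by
          unfold BB
          rw [hb, if_pos (by omega)]
          norm_num
        rw [PySem.List.pyRange_one_cons hpn, List.foldl_cons, hbb]
        have hmax : max 0 (q - p) = q - p := by omega
        rw [hmax]
        exact ih (p + 1) q (res + 2 ^ (q - p).toNat) (by omega) (by omega) (by omega) h2
          (fun i j hi hj hq hjn => hinv i j (by omega) hj hq hjn)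
    · rw [if_neg hpq]
      exact (tail_zero s target ((s.length : Int) - p).toNat p res (le_refl _) h0
        (fun i j hi hj hjn => hinv i j hi hj (by omega) hjn)).symm

-- ===== VERDICT (by name: the statement is the Claim_ definition above) =====
theorem subsetWithTarget_spec : Claim_equal_subsetWithTarget := by
  intro nums target _dom
  unfold Spec_subsetWithTarget
  rw [alt_eq_foldl]
  show loopA _ target _ 0 _ 0 = _
  exact loopA_eq (PySem.List.sorted nums (fun x => x) false) target
    (PySem.List.sorted_pairwise nums (fun x => x))
    (PySem.List.sorted nums (fun x => x) false).length 0
    (((PySem.List.sorted nums (fun x => x) false).length : Int) - 1) 0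
    (by omega) (by omega) (by omega) (by omega)
    (fun i j hi hj hq hjn => absurd hq (by omega))
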